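-- pv_equiv track=rewrite | github.com/rhythm-semwal/DS-Algo | queue_questions/N integers containing only 1, 2 & 3.py | solve
-- ===== SOURCE A (Python) =====
-- def solve(A):
--     from collections import deque
--     numbers_queue = deque()
--     numbers_queue.append(1)
--     numbers_queue.append(2)
--     numbers_queue.append(3)
--
--     num_count = 3
--     result = list()
--     # approach 1
--     while len(result) < A:
--         current = numbers_queue.popleft()
--         result.append(current)
--         numbers_queue.append(current * 10 + 1)
--         numbers_queue.append(current * 10 + 2)
--         numbers_queue.append(current * 10 + 3)
--
--     return result
-- ===== SOURCE B (Python) =====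
-- def solve(A):
--     result = []
--     for i in range(1, A + 1):
--         n = i
--         value = 0
--         place = 1
--         while n:
--             n -= 1
--             value += (n % 3 + 1) * place
--             place *= 10
--             n //= 3
--         result.append(value)
--     return result
-- ===== Notes on version B (the rewrite author's own statement) =====
-- stated objective: alternative
-- what changed: Replaces the BFS queue (popping each number and enqueuing its three 10x+d children) by a direct per-index computation: the i-th number is i written in bijective base 3 with digits 1,2,3, computed independently for each i; no queue is maintained.
import Mathlib
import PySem

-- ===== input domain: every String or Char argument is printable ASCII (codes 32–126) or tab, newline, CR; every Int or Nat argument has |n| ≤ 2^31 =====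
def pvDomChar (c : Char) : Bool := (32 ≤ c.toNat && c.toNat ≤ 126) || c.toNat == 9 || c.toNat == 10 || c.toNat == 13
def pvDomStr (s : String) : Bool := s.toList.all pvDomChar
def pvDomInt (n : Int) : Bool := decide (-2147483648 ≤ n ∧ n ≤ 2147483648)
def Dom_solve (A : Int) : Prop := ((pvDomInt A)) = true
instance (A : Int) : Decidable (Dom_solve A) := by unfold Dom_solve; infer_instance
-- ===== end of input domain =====

-- B replaces A's BFS queue by computing each element directly from its 1-based index
-- in bijective base 3 (digits 1,2,3); alternative decomposition, same return value.

-- ===== PORT A =====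
-- A's while loop runs exactly max(A,0) times (result grows by one per iteration from 0);
-- fuel = A.toNat is that count.  The queue is never empty (each pop enqueues three),
-- so the [] branch is unreachable.
def solveLoop : Nat → List Int → List Int → List Int
  | 0, _, result => result
  | _ + 1, [], result => result
  | fuel + 1, c :: qs, result =>
      solveLoop fuel (qs ++ [c * 10 + 1, c * 10 + 2, c * 10 + 3]) (result ++ [c])

def solve (A : Int) : List Int := solveLoop A.toNat [1, 2, 3] []

-- ===== PORT B =====
-- B's inner while loop: n is always ≥ 0 in Python, ported as Nat; state (n, value, place).
def bij3Loop (n : Nat) (value place : Int) : Int :=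
  if n = 0 then value
  else bij3Loop ((n - 1) / 3) (value + ((((n - 1) % 3 : Nat) : Int) + 1) * place) (place * 10)
  termination_by n
  decreasing_by
    have h := Nat.div_le_self (n - 1) 3
    omega

-- 'for i in range(1, A+1)' ported as a map over the A.toNat indices, i = k+1.
def solve_alt (A : Int) : List Int :=
  (List.range A.toNat).map (fun k => bij3Loop (k + 1) 0 1)

-- ===== PRECONDITION & SPEC =====
def Spec_solve (A : Int) (out : List Int) : Prop := out = solve_alt A
instance (A : Int) (out : List Int) : Decidable (Spec_solve A out) := by unfold Spec_solve; infer_instance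

-- ===== CLAIM (what is proved, stated in full; the proofs are below) =====
def Claim_equal_solve : Prop := ∀ (A : Int), Dom_solve A → Spec_solve A (solve A)

-- ===== LEMMAS AND PROOFS =====

-- the value of index n (n ≥ 1): n in bijective base 3 over digits {1,2,3}
def g (n : Nat) : Int := bij3Loop n 0 1

-- the accumulator pair (value, place) factors out of the loop
lemma bij3Loop_acc (n : Nat) : ∀ (v p : Int), bij3Loop n v p = v + p * bij3Loop n 0 1 := by
  induction n using Nat.strong_induction_on with
  | _ n ih =>
    intro v p
    conv_lhs => rw [bij3Loop]
    conv_rhs => rw [bij3Loop]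
    by_cases h : n = 0
    · simp [h]
    · simp only [if_neg h]
      have hlt : (n - 1) / 3 < n := by
        have := Nat.div_le_self (n - 1) 3; omega
      rw [ih _ hlt, ih _ hlt (0 + ((((n - 1) % 3 : Nat) : Int) + 1) * 1) (1 * 10)]
      ring

-- children: the number at index 3*i + d + 1 (d < 3) appends digit d+1 to the number at index i
lemma g_child (i d : Nat) (hd : d < 3) : g (3 * i + d + 1) = g i * 10 + (d + 1 : Int) := by
  unfold g
  rw [bij3Loop]
  have h3 : (3 * i + d + 1) - 1 = 3 * i + d := by omega
  have hdiv : (3 * i + d) / 3 = i := by omega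
  have hmod : (3 * i + d) % 3 = d := by omega
  simp only [if_neg (by omega : ¬ 3 * i + d + 1 = 0), h3, hdiv, hmod]
  -- now the recursive call is bij3Loop i (0 + (d+1)*1) (1*10)
  rw [bij3Loop_acc]
  push_cast
  ring

-- loop invariant: when the queue holds g of the 2n+3 consecutive indices n+1 … 3n+3,
-- running the loop appends g of the next `fuel` indices to the result
lemma solveLoop_inv (fuel : Nat) : ∀ (n : Nat) (res : List Int),
    solveLoop fuel ((List.range' (n + 1) (2 * n + 3)).map g) res
      = res ++ (List.range' (n + 1) fuel).map g := by
  induction fuel with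
  | zero => intro n res; simp [solveLoop]
  | succ fuel ih =>
    intro n res
    have hq : (2 * n + 3) = (2 * n + 2) + 1 := by omega
    rw [hq, List.range'_succ, List.map_cons, solveLoop]
    have hqueue : (List.range' (n + 2) (2 * n + 2)).map g
          ++ [g (n + 1) * 10 + 1, g (n + 1) * 10 + 2, g (n + 1) * 10 + 3]
        = (List.range' ((n + 1) + 1) (2 * (n + 1) + 3)).map g := by
      have h1 : g (n + 1) * 10 + 1 = g (3 * (n + 1) + 0 + 1) := by
        rw [g_child (n + 1) 0 (by omega)]; norm_num
      have h2 : g (n + 1) * 10 + 2 = g (3 * (n + 1) + 1 + 1) := by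
        rw [g_child (n + 1) 1 (by omega)]; norm_num
      have h3 : g (n + 1) * 10 + 3 = g (3 * (n + 1) + 2 + 1) := by
        rw [g_child (n + 1) 2 (by omega)]; norm_num
      have hr : List.range' (n + 2) (2 * n + 2) ++ List.range' (3 * n + 4) 3
          = List.range' (n + 2) (2 * n + 5) := by
        have := @List.range'_append (n + 2) (2 * n + 2) 3 1
        simpa [show n + 2 + (2 * n + 2) = 3 * n + 4 by omega,
               show 2 * n + 2 + 3 = 2 * n + 5 by omega] using this
      calc (List.range' (n + 2) (2 * n + 2)).map g
            ++ [g (n + 1) * 10 + 1, g (n + 1) * 10 + 2, g (n + 1) * 10 + 3]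
          = ((List.range' (n + 2) (2 * n + 2)) ++ List.range' (3 * n + 4) 3).map g := by
            rw [List.map_append]
            simp [List.range', h1, h2, h3,
                  show 3 * (n + 1) + 0 + 1 = 3 * n + 4 by omega,
                  show 3 * (n + 1) + 1 + 1 = 3 * n + 5 by omega,
                  show 3 * n + 4 + 1 = 3 * n + 5 by omega,
                  show 3 * n + 5 + 1 = 3 * n + 6 by omega]
        _ = (List.range' (n + 2) (2 * n + 5)).map g := by rw [hr]
        _ = (List.range' ((n + 1) + 1) (2 * (n + 1) + 3)).map g := by
            norm_num [show 2 * (n + 1) + 3 = 2 * n + 5 by omega]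
    rw [hqueue, ih (n + 1) (res ++ [g (n + 1)])]
    rw [List.range'_succ, List.map_cons]
    simp

lemma solve_eq_map (A : Int) : solve A = (List.range' 1 A.toNat).map g := by
  have hinit : ([1, 2, 3] : List Int) = (List.range' (0 + 1) (2 * 0 + 3)).map g := by
    have g1 : g 1 = 1 := by unfold g; rw [bij3Loop, bij3Loop]; norm_num
    have g2 : g 2 = 2 := by unfold g; rw [bij3Loop, bij3Loop]; norm_num
    have g3 : g 3 = 3 := by unfold g; rw [bij3Loop, bij3Loop]; norm_num
    simp [List.range', g1, g2, g3]
  rw [solve, hinit, solveLoop_inv A.toNat 0 []]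
  simp

-- ===== VERDICT (by name: the statement is the Claim_ definition above) =====
theorem solve_spec : Claim_equal_solve := by
  intro A _
  unfold Spec_solve solve_alt
  rw [solve_eq_map, List.range'_eq_map_range]
  simp only [List.map_map]
  exact List.map_congr_left (fun k _ => by
    show g (1 + k) = bij3Loop (k + 1) 0 1
    rw [Nat.add_comm]; rfl)
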